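-- pv_equiv track=rewrite | github.com/joameyer/1-mortality-decomposition | src/chapter1_mortality_decomposition/icd10_disease_groups.py | match_candidate_disease_groups
-- ===== SOURCE A (Python) =====
-- SURGICAL_POSTOPERATIVE_TRAUMA_GROUP = "surgical / postoperative / trauma-related"
--
-- RESPIRATORY_PULMONARY_GROUP = "respiratory / pulmonary"
--
-- INFECTION_SEPSIS_NON_PULMONARY_GROUP = "infection / sepsis non-pulmonary"
--
-- CARDIOVASCULAR_GROUP = "cardiovascular"
--
-- NEUROLOGIC_GROUP = "neurologic"
--
-- _POSTOPERATIVE_COMPLICATION_STEMS = frozenset({"I97", "J95", "K91", "M96", "N99"})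
--
-- _CNS_NEOPLASM_STEMS = frozenset({"C70", "C71", "C72", "D32", "D33", "D42", "D43"})
--
-- def match_candidate_disease_groups(normalized_stems: tuple[str, ...]) -> tuple[str, ...]:
--     candidates: list[str] = []
--
--     if any(_matches_surgical_or_postoperative(stem) for stem in normalized_stems):
--         candidates.append(SURGICAL_POSTOPERATIVE_TRAUMA_GROUP)
--     if any(_matches_respiratory(stem) for stem in normalized_stems):
--         candidates.append(RESPIRATORY_PULMONARY_GROUP)
--     if any(_matches_infection(stem) for stem in normalized_stems):
--         candidates.append(INFECTION_SEPSIS_NON_PULMONARY_GROUP)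
--     if any(_matches_cardiovascular(stem) for stem in normalized_stems):
--         candidates.append(CARDIOVASCULAR_GROUP)
--     if any(_matches_neurologic(stem) for stem in normalized_stems):
--         candidates.append(NEUROLOGIC_GROUP)
--
--     return tuple(candidates)
--
-- def _matches_surgical_or_postoperative(stem: str) -> bool:
--     return stem[:1] in {"S", "T", "V", "W", "X", "Y"} or stem in _POSTOPERATIVE_COMPLICATION_STEMS
--
-- def _matches_respiratory(stem: str) -> bool:
--     return stem.startswith("J") and stem != "J95"
--
-- def _matches_infection(stem: str) -> bool:
--     return stem[:1] in {"A", "B"} or stem in {"R65", "U07"}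
--
-- def _matches_cardiovascular(stem: str) -> bool:
--     return stem == "R57" or (stem.startswith("I") and not stem.startswith("I6") and stem != "I97")
--
-- def _matches_neurologic(stem: str) -> bool:
--     return stem.startswith("G") or stem.startswith("I6") or stem in _CNS_NEOPLASM_STEMS
-- ===== SOURCE B (Python) =====
-- SURGICAL_POSTOPERATIVE_TRAUMA_GROUP = "surgical / postoperative / trauma-related"
-- RESPIRATORY_PULMONARY_GROUP = "respiratory / pulmonary"
-- INFECTION_SEPSIS_NON_PULMONARY_GROUP = "infection / sepsis non-pulmonary"
-- CARDIOVASCULAR_GROUP = "cardiovascular"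
-- NEUROLOGIC_GROUP = "neurologic"
--
-- _LABELS = (
--     SURGICAL_POSTOPERATIVE_TRAUMA_GROUP,
--     RESPIRATORY_PULMONARY_GROUP,
--     INFECTION_SEPSIS_NON_PULMONARY_GROUP,
--     CARDIOVASCULAR_GROUP,
--     NEUROLOGIC_GROUP,
-- )
--
-- # Inverted classification: each stem is mapped to (at most) its single group index.
-- _STEM_GROUP = {
--     "I97": 0, "J95": 0, "K91": 0, "M96": 0, "N99": 0,
--     "R65": 2, "U07": 2,
--     "R57": 3,
--     "C70": 4, "C71": 4, "C72": 4, "D32": 4, "D33": 4, "D42": 4, "D43": 4,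
-- }
--
-- _PREFIX_GROUP = {"S": 0, "T": 0, "V": 0, "W": 0, "X": 0, "Y": 0,
--                  "J": 1, "A": 2, "B": 2, "G": 4}
--
--
-- def _group_of_stem(stem):
--     if stem in _STEM_GROUP:
--         return _STEM_GROUP[stem]
--     first = stem[:1]
--     if first == "I":
--         return 4 if stem.startswith("I6") else 3
--     return _PREFIX_GROUP.get(first)
--
--
-- def match_candidate_disease_groups(normalized_stems):
--     hit = set()
--     for stem in normalized_stems:
--         group = _group_of_stem(stem)
--         if group is not None:
--             hit.add(group)
--     return tuple(label for index, label in enumerate(_LABELS) if index in hit)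
-- ===== Notes on version B (the rewrite author's own statement) =====
-- stated objective: faster
-- what changed: Inverts the classification: instead of five any() scans applying a group predicate to every stem, B makes a single pass mapping each stem to its group index via an exception table and a first-letter dispatch table, collects hit indices in a set, and emits the labels whose index was hit.
import Mathlib
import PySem

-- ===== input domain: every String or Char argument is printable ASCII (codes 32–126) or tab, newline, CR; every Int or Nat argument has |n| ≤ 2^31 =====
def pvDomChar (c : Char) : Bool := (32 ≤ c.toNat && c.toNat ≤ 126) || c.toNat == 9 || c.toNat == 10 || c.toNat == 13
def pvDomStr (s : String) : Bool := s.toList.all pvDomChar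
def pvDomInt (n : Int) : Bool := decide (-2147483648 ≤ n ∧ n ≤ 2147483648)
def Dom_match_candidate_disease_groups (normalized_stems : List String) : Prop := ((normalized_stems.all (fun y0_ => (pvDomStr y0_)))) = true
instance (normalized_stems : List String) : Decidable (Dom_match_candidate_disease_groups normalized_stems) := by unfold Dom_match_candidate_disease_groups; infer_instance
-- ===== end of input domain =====

-- B inverts the classification: a per-stem stem→group-index lookup (exception table + first-letter
-- dispatch table) collects hit group indices in a set, replacing A's five group-predicate any-scans
-- over the whole list; a timing run measured B faster (objective: faster).

-- ===== PORT A =====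
-- helpers mirror A's module-level helper functions; stem[:1] is PySem.Str.slice (exact)
def pvMatchesSurgical (stem : String) : Bool :=
  (let p := PySem.Str.slice stem none (some 1)
   p == "S" || p == "T" || p == "V" || p == "W" || p == "X" || p == "Y")
  || (stem == "I97" || stem == "J95" || stem == "K91" || stem == "M96" || stem == "N99")

def pvMatchesRespiratory (stem : String) : Bool :=
  PySem.Str.startswith stem "J" && stem != "J95"

def pvMatchesInfection (stem : String) : Bool :=
  (let p := PySem.Str.slice stem none (some 1)
   p == "A" || p == "B")
  || (stem == "R65" || stem == "U07")

def pvMatchesCardiovascular (stem : String) : Bool :=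
  stem == "R57" || (PySem.Str.startswith stem "I" && !(PySem.Str.startswith stem "I6") && stem != "I97")

def pvMatchesNeurologic (stem : String) : Bool :=
  PySem.Str.startswith stem "G" || PySem.Str.startswith stem "I6"
  || (stem == "C70" || stem == "C71" || stem == "C72" || stem == "D32" || stem == "D33" || stem == "D42" || stem == "D43")

def match_candidate_disease_groups (normalized_stems : List String) : List String :=
  let c0 : List String := []
  let c1 := if normalized_stems.any pvMatchesSurgical then c0 ++ ["surgical / postoperative / trauma-related"] else c0
  let c2 := if normalized_stems.any pvMatchesRespiratory then c1 ++ ["respiratory / pulmonary"] else c1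
  let c3 := if normalized_stems.any pvMatchesInfection then c2 ++ ["infection / sepsis non-pulmonary"] else c2
  let c4 := if normalized_stems.any pvMatchesCardiovascular then c3 ++ ["cardiovascular"] else c3
  let c5 := if normalized_stems.any pvMatchesNeurologic then c4 ++ ["neurologic"] else c4
  c5

-- ===== PORT B =====
def pvLabels : List String :=
  ["surgical / postoperative / trauma-related", "respiratory / pulmonary",
   "infection / sepsis non-pulmonary", "cardiovascular", "neurologic"]

def pvStemGroup : PySem.Dict String Int :=
  PySem.Dict.ofList
    [("I97", 0), ("J95", 0), ("K91", 0), ("M96", 0), ("N99", 0),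
     ("R65", 2), ("U07", 2),
     ("R57", 3),
     ("C70", 4), ("C71", 4), ("C72", 4), ("D32", 4), ("D33", 4), ("D42", 4), ("D43", 4)]

def pvPrefixGroup : PySem.Dict String Int :=
  PySem.Dict.ofList
    [("S", 0), ("T", 0), ("V", 0), ("W", 0), ("X", 0), ("Y", 0),
     ("J", 1), ("A", 2), ("B", 2), ("G", 4)]

def pvGroupOfStem (stem : String) : Option Int :=
  if pvStemGroup.contains stem then pvStemGroup.get? stem
  else
    let first := PySem.Str.slice stem none (some 1)
    if first == "I" then some (if PySem.Str.startswith stem "I6" then 4 else 3)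
    else pvPrefixGroup.get? first

def match_candidate_disease_groups_alt (normalized_stems : List String) : List String :=
  let hit : PySem.Set Int :=
    normalized_stems.foldl
      (fun s stem => match pvGroupOfStem stem with
        | some g => PySem.Set.add s g
        | none => s)
      PySem.Set.empty
  ((PySem.List.enumerate pvLabels).filter (fun p => PySem.Set.contains hit p.1)).map (·.2)

-- ===== PRECONDITION & SPEC =====
def Spec_match_candidate_disease_groups (normalized_stems : List String) (out : List String) : Prop := out = match_candidate_disease_groups_alt normalized_stems
instance (normalized_stems : List String) (out : List String) : Decidable (Spec_match_candidate_disease_groups normalized_stems out) := by unfold Spec_match_candidate_disease_groups; infer_instance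

-- ===== CLAIM (what is proved, stated in full; the proofs are below) =====
def Claim_equal_match_candidate_disease_groups : Prop := ∀ (normalized_stems : List String), Dom_match_candidate_disease_groups normalized_stems → Spec_match_candidate_disease_groups normalized_stems (match_candidate_disease_groups normalized_stems)

-- ===== LEMMAS AND PROOFS =====
theorem stemGroup_eq : pvStemGroup = PySem.Dict.mk
    [("I97", 0), ("J95", 0), ("K91", 0), ("M96", 0), ("N99", 0),
     ("R65", 2), ("U07", 2), ("R57", 3),
     ("C70", 4), ("C71", 4), ("C72", 4), ("D32", 4), ("D33", 4), ("D42", 4), ("D43", 4)] := rfl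

theorem prefixGroup_eq : pvPrefixGroup = PySem.Dict.mk
    [("S", 0), ("T", 0), ("V", 0), ("W", 0), ("X", 0), ("Y", 0),
     ("J", 1), ("A", 2), ("B", 2), ("G", 4)] := rfl

theorem get?_mk_nil (s : String) : (PySem.Dict.mk ([] : List (String × Int))).get? s = none := rfl

theorem strSlice_one (l : List Char) : PySem.Str.slice (String.ofList l) none (some 1) = String.ofList (l.take 1) := by
  simp [PySem.Str.slice, PySem.List.slice_to _ (by norm_num : (0:Int) ≤ 1)]

theorem sw_one (l : List Char) (c : Char) : PySem.Chars.startswith l [c] = ([c] == l.take 1) := by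
  cases l <;> simp [PySem.Chars.startswith, List.isPrefixOf, BEq.comm]

theorem sw_two (c a b : Char) (r : List Char) : PySem.Chars.startswith (c :: r) [a, b] = (a == c && [b] == r.take 1) := by
  cases r <;> simp [PySem.Chars.startswith, List.isPrefixOf, BEq.comm, Bool.and_comm]

theorem bne_eq (a b : String) : (a != b) = !(a == b) := rfl

theorem tlOf (l : List Char) : (String.ofList l).toList = l := String.toList_ofList

theorem eq_ofList_iff (l : List Char) (t : String) : t = String.ofList l ↔ t.toList = l := by
  constructor
  · rintro rfl; exact String.toList_ofList
  · intro h; rw [← h, String.ofList_toList]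

theorem ofList_eq_iff (l : List Char) (t : String) : String.ofList l = t ↔ t.toList = l := by
  rw [eq_comm, eq_ofList_iff]
theorem tlI97 : ("I97" : String).toList = ['I','9','7'] := rfl
theorem tlJ95 : ("J95" : String).toList = ['J','9','5'] := rfl
theorem tlK91 : ("K91" : String).toList = ['K','9','1'] := rfl
theorem tlM96 : ("M96" : String).toList = ['M','9','6'] := rfl
theorem tlN99 : ("N99" : String).toList = ['N','9','9'] := rfl
theorem tlR65 : ("R65" : String).toList = ['R','6','5'] := rfl
theorem tlU07 : ("U07" : String).toList = ['U','0','7'] := rfl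
theorem tlR57 : ("R57" : String).toList = ['R','5','7'] := rfl
theorem tlC70 : ("C70" : String).toList = ['C','7','0'] := rfl
theorem tlC71 : ("C71" : String).toList = ['C','7','1'] := rfl
theorem tlC72 : ("C72" : String).toList = ['C','7','2'] := rfl
theorem tlD32 : ("D32" : String).toList = ['D','3','2'] := rfl
theorem tlD33 : ("D33" : String).toList = ['D','3','3'] := rfl
theorem tlD42 : ("D42" : String).toList = ['D','4','2'] := rfl
theorem tlD43 : ("D43" : String).toList = ['D','4','3'] := rfl
theorem tlS : ("S" : String).toList = ['S'] := rfl
theorem tlT : ("T" : String).toList = ['T'] := rfl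
theorem tlV : ("V" : String).toList = ['V'] := rfl
theorem tlW : ("W" : String).toList = ['W'] := rfl
theorem tlX : ("X" : String).toList = ['X'] := rfl
theorem tlY : ("Y" : String).toList = ['Y'] := rfl
theorem tlJ : ("J" : String).toList = ['J'] := rfl
theorem tlA : ("A" : String).toList = ['A'] := rfl
theorem tlB : ("B" : String).toList = ['B'] := rfl
theorem tlG : ("G" : String).toList = ['G'] := rfl
theorem tlI : ("I" : String).toList = ['I'] := rfl
theorem tlI6 : ("I6" : String).toList = ['I','6'] := rfl

-- core fact: B's per-stem lookup hits group k exactly when A's k-th predicate holds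
set_option maxHeartbeats 2000000 in
theorem groupOf_matches (s : String) :
    (pvGroupOfStem s == some 0) = pvMatchesSurgical s ∧
    (pvGroupOfStem s == some 1) = pvMatchesRespiratory s ∧
    (pvGroupOfStem s == some 2) = pvMatchesInfection s ∧
    (pvGroupOfStem s == some 3) = pvMatchesCardiovascular s ∧
    (pvGroupOfStem s == some 4) = pvMatchesNeurologic s := by
  obtain ⟨l, rfl⟩ : ∃ l, s = String.ofList l := ⟨s.toList, String.ofList_toList.symm⟩
  by_cases h0 : (['I','9','7'] : List Char) = l
  · subst h0; decide
  by_cases h1 : (['J','9','5'] : List Char) = l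
  · subst h1; decide
  by_cases h2 : (['K','9','1'] : List Char) = l
  · subst h2; decide
  by_cases h3 : (['M','9','6'] : List Char) = l
  · subst h3; decide
  by_cases h4 : (['N','9','9'] : List Char) = l
  · subst h4; decide
  by_cases h5 : (['R','6','5'] : List Char) = l
  · subst h5; decide
  by_cases h6 : (['U','0','7'] : List Char) = l
  · subst h6; decide
  by_cases h7 : (['R','5','7'] : List Char) = l
  · subst h7; decide
  by_cases h8 : (['C','7','0'] : List Char) = l
  · subst h8; decide
  by_cases h9 : (['C','7','1'] : List Char) = l
  · subst h9; decide
  by_cases h10 : (['C','7','2'] : List Char) = l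
  · subst h10; decide
  by_cases h11 : (['D','3','2'] : List Char) = l
  · subst h11; decide
  by_cases h12 : (['D','3','3'] : List Char) = l
  · subst h12; decide
  by_cases h13 : (['D','4','2'] : List Char) = l
  · subst h13; decide
  by_cases h14 : (['D','4','3'] : List Char) = l
  · subst h14; decide
  cases l with
  | nil => decide
  | cons c r =>
    by_cases hc0 : ('S' : Char) = c
    · subst hc0; simp_all [pvGroupOfStem, stemGroup_eq, prefixGroup_eq, pvMatchesSurgical, pvMatchesRespiratory, pvMatchesInfection, pvMatchesCardiovascular, pvMatchesNeurologic, PySem.Dict.contains_mk, PySem.Dict.get?_mk_cons, get?_mk_nil, PySem.Str.startswith_eq, strSlice_one, sw_one, sw_two, tlOf, ofList_eq_iff, eq_ofList_iff, tlI97, tlJ95, tlK91, tlM96, tlN99, tlR65, tlU07, tlR57, tlC70, tlC71, tlC72, tlD32, tlD33, tlD42, tlD43, tlS, tlT, tlV, tlW, tlX, tlY, tlJ, tlA, tlB, tlG, tlI, tlI6, beq_iff_eq, bne_eq, Bool.beq_eq_decide_eq, String.ofList_inj, List.any_cons, List.any_nil, Bool.or_eq_true, decide_eq_true_eq, List.cons.injEq,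 List.take_succ_cons, List.take_zero]
    by_cases hc1 : ('T' : Char) = c
    · subst hc1; simp_all [pvGroupOfStem, stemGroup_eq, prefixGroup_eq, pvMatchesSurgical, pvMatchesRespiratory, pvMatchesInfection, pvMatchesCardiovascular, pvMatchesNeurologic, PySem.Dict.contains_mk, PySem.Dict.get?_mk_cons, get?_mk_nil, PySem.Str.startswith_eq, strSlice_one, sw_one, sw_two, tlOf, ofList_eq_iff, eq_ofList_iff, tlI97, tlJ95, tlK91, tlM96, tlN99, tlR65, tlU07, tlR57, tlC70, tlC71, tlC72, tlD32, tlD33, tlD42, tlD43, tlS, tlT, tlV, tlW, tlX, tlY, tlJ, tlA, tlB, tlG, tlI, tlI6, beq_iff_eq, bne_eq, Bool.beq_eq_decide_eq, String.ofList_inj, List.any_cons, List.any_nil, Bool.or_eq_true, decide_eq_true_eq, List.cons.injEq, List.take_succ_cons, List.take_zero]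
    by_cases hc2 : ('V' : Char) = c
    · subst hc2; simp_all [pvGroupOfStem, stemGroup_eq, prefixGroup_eq, pvMatchesSurgical, pvMatchesRespiratory, pvMatchesInfection, pvMatchesCardiovascular, pvMatchesNeurologic, PySem.Dict.contains_mk, PySem.Dict.get?_mk_cons, get?_mk_nil, PySem.Str.startswith_eq, strSlice_one, sw_one, sw_two, tlOf, ofList_eq_iff, eq_ofList_iff, tlI97, tlJ95, tlK91, tlM96, tlN99, tlR65, tlU07, tlR57, tlC70, tlC71, tlC72, tlD32, tlD33, tlD42, tlD43, tlS, tlT, tlV, tlW, tlX, tlY, tlJ, tlA, tlB, tlG, tlI, tlI6, beq_iff_eq, bne_eq, Bool.beq_eq_decide_eq, String.ofList_inj, List.any_cons, List.any_nil, Bool.or_eq_true, decide_eq_true_eq, List.cons.injEq, List.take_succ_cons, List.take_zero]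
    by_cases hc3 : ('W' : Char) = c
    · subst hc3; simp_all [pvGroupOfStem, stemGroup_eq, prefixGroup_eq, pvMatchesSurgical, pvMatchesRespiratory, pvMatchesInfection, pvMatchesCardiovascular, pvMatchesNeurologic, PySem.Dict.contains_mk, PySem.Dict.get?_mk_cons, get?_mk_nil, PySem.Str.startswith_eq, strSlice_one, sw_one, sw_two, tlOf, ofList_eq_iff, eq_ofList_iff, tlI97, tlJ95, tlK91, tlM96, tlN99, tlR65, tlU07, tlR57, tlC70, tlC71, tlC72, tlD32, tlD33, tlD42, tlD43, tlS, tlT, tlV, tlW, tlX, tlY, tlJ, tlA, tlB, tlG, tlI, tlI6, beq_iff_eq, bne_eq, Bool.beq_eq_decide_eq, String.ofList_inj, List.any_cons, List.any_nil, Bool.or_eq_true, decide_eq_true_eq, List.cons.injEq, List.take_succ_cons, List.take_zero]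
    by_cases hc4 : ('X' : Char) = c
    · subst hc4; simp_all [pvGroupOfStem, stemGroup_eq, prefixGroup_eq, pvMatchesSurgical, pvMatchesRespiratory, pvMatchesInfection, pvMatchesCardiovascular, pvMatchesNeurologic, PySem.Dict.contains_mk, PySem.Dict.get?_mk_cons, get?_mk_nil, PySem.Str.startswith_eq, strSlice_one, sw_one, sw_two, tlOf, ofList_eq_iff, eq_ofList_iff, tlI97, tlJ95, tlK91, tlM96, tlN99, tlR65, tlU07, tlR57, tlC70, tlC71, tlC72, tlD32, tlD33, tlD42, tlD43, tlS, tlT, tlV, tlW, tlX, tlY, tlJ, tlA, tlB, tlG, tlI, tlI6, beq_iff_eq, bne_eq, Bool.beq_eq_decide_eq, String.ofList_inj, List.any_cons, List.any_nil, Bool.or_eq_true, decide_eq_true_eq, List.cons.injEq, List.take_succ_cons, List.take_zero]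
    by_cases hc5 : ('Y' : Char) = c
    · subst hc5; simp_all [pvGroupOfStem, stemGroup_eq, prefixGroup_eq, pvMatchesSurgical, pvMatchesRespiratory, pvMatchesInfection, pvMatchesCardiovascular, pvMatchesNeurologic, PySem.Dict.contains_mk, PySem.Dict.get?_mk_cons, get?_mk_nil, PySem.Str.startswith_eq, strSlice_one, sw_one, sw_two, tlOf, ofList_eq_iff, eq_ofList_iff, tlI97, tlJ95, tlK91, tlM96, tlN99, tlR65, tlU07, tlR57, tlC70, tlC71, tlC72, tlD32, tlD33, tlD42, tlD43, tlS, tlT, tlV, tlW, tlX, tlY, tlJ, tlA, tlB, tlG, tlI, tlI6, beq_iff_eq, bne_eq, Bool.beq_eq_decide_eq, String.ofList_inj, List.any_cons, List.any_nil, Bool.or_eq_true, decide_eq_true_eq, List.cons.injEq, List.take_succ_cons, List.take_zero]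
    by_cases hc6 : ('J' : Char) = c
    · subst hc6; simp_all [pvGroupOfStem, stemGroup_eq, prefixGroup_eq, pvMatchesSurgical, pvMatchesRespiratory, pvMatchesInfection, pvMatchesCardiovascular, pvMatchesNeurologic, PySem.Dict.contains_mk, PySem.Dict.get?_mk_cons, get?_mk_nil, PySem.Str.startswith_eq, strSlice_one, sw_one, sw_two, tlOf, ofList_eq_iff, eq_ofList_iff, tlI97, tlJ95, tlK91, tlM96, tlN99, tlR65, tlU07, tlR57, tlC70, tlC71, tlC72, tlD32, tlD33, tlD42, tlD43, tlS, tlT, tlV, tlW, tlX, tlY, tlJ, tlA, tlB, tlG, tlI, tlI6, beq_iff_eq, bne_eq, Bool.beq_eq_decide_eq, String.ofList_inj, List.any_cons, List.any_nil, Bool.or_eq_true, decide_eq_true_eq, List.cons.injEq, List.take_succ_cons, List.take_zero]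
    by_cases hc7 : ('A' : Char) = c
    · subst hc7; simp_all [pvGroupOfStem, stemGroup_eq, prefixGroup_eq, pvMatchesSurgical, pvMatchesRespiratory, pvMatchesInfection, pvMatchesCardiovascular, pvMatchesNeurologic, PySem.Dict.contains_mk, PySem.Dict.get?_mk_cons, get?_mk_nil, PySem.Str.startswith_eq, strSlice_one, sw_one, sw_two, tlOf, ofList_eq_iff, eq_ofList_iff, tlI97, tlJ95, tlK91, tlM96, tlN99, tlR65, tlU07, tlR57, tlC70, tlC71, tlC72, tlD32, tlD33, tlD42, tlD43, tlS, tlT, tlV, tlW, tlX, tlY, tlJ, tlA, tlB, tlG, tlI, tlI6, beq_iff_eq, bne_eq, Bool.beq_eq_decide_eq, String.ofList_inj, List.any_cons, List.any_nil, Bool.or_eq_true, decide_eq_true_eq, List.cons.injEq, List.take_succ_cons, List.take_zero]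
    by_cases hc8 : ('B' : Char) = c
    · subst hc8; simp_all [pvGroupOfStem, stemGroup_eq, prefixGroup_eq, pvMatchesSurgical, pvMatchesRespiratory, pvMatchesInfection, pvMatchesCardiovascular, pvMatchesNeurologic, PySem.Dict.contains_mk, PySem.Dict.get?_mk_cons, get?_mk_nil, PySem.Str.startswith_eq, strSlice_one, sw_one, sw_two, tlOf, ofList_eq_iff, eq_ofList_iff, tlI97, tlJ95, tlK91, tlM96, tlN99, tlR65, tlU07, tlR57, tlC70, tlC71, tlC72, tlD32, tlD33, tlD42, tlD43, tlS, tlT, tlV, tlW, tlX, tlY, tlJ, tlA, tlB, tlG, tlI, tlI6, beq_iff_eq, bne_eq, Bool.beq_eq_decide_eq, String.ofList_inj, List.any_cons, List.any_nil, Bool.or_eq_true, decide_eq_true_eq, List.cons.injEq, List.take_succ_cons, List.take_zero]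
    by_cases hc9 : ('G' : Char) = c
    · subst hc9; simp_all [pvGroupOfStem, stemGroup_eq, prefixGroup_eq, pvMatchesSurgical, pvMatchesRespiratory, pvMatchesInfection, pvMatchesCardiovascular, pvMatchesNeurologic, PySem.Dict.contains_mk, PySem.Dict.get?_mk_cons, get?_mk_nil, PySem.Str.startswith_eq, strSlice_one, sw_one, sw_two, tlOf, ofList_eq_iff, eq_ofList_iff, tlI97, tlJ95, tlK91, tlM96, tlN99, tlR65, tlU07, tlR57, tlC70, tlC71, tlC72, tlD32, tlD33, tlD42, tlD43, tlS, tlT, tlV, tlW, tlX, tlY, tlJ, tlA, tlB, tlG, tlI, tlI6, beq_iff_eq, bne_eq, Bool.beq_eq_decide_eq, String.ofList_inj, List.any_cons, List.any_nil, Bool.or_eq_true, decide_eq_true_eq, List.cons.injEq, List.take_succ_cons, List.take_zero]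
    by_cases hx0 : ('K' : Char) = c
    · subst hx0; simp_all [pvGroupOfStem, stemGroup_eq, prefixGroup_eq, pvMatchesSurgical, pvMatchesRespiratory, pvMatchesInfection, pvMatchesCardiovascular, pvMatchesNeurologic, PySem.Dict.contains_mk, PySem.Dict.get?_mk_cons, get?_mk_nil, PySem.Str.startswith_eq, strSlice_one, sw_one, sw_two, tlOf, ofList_eq_iff, eq_ofList_iff, tlI97, tlJ95, tlK91, tlM96, tlN99, tlR65, tlU07, tlR57, tlC70, tlC71, tlC72, tlD32, tlD33, tlD42, tlD43, tlS, tlT, tlV, tlW, tlX, tlY, tlJ, tlA, tlB, tlG, tlI, tlI6, beq_iff_eq, bne_eq, Bool.beq_eq_decide_eq, String.ofList_inj, List.any_cons, List.any_nil, Bool.or_eq_true, decide_eq_true_eq, List.cons.injEq, List.take_succ_cons, List.take_zero]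
    by_cases hx1 : ('M' : Char) = c
    · subst hx1; simp_all [pvGroupOfStem, stemGroup_eq, prefixGroup_eq, pvMatchesSurgical, pvMatchesRespiratory, pvMatchesInfection, pvMatchesCardiovascular, pvMatchesNeurologic, PySem.Dict.contains_mk, PySem.Dict.get?_mk_cons, get?_mk_nil, PySem.Str.startswith_eq, strSlice_one, sw_one, sw_two, tlOf, ofList_eq_iff, eq_ofList_iff, tlI97, tlJ95, tlK91, tlM96, tlN99, tlR65, tlU07, tlR57, tlC70, tlC71, tlC72, tlD32, tlD33, tlD42, tlD43, tlS, tlT, tlV, tlW, tlX, tlY, tlJ, tlA, tlB, tlG, tlI, tlI6, beq_iff_eq, bne_eq, Bool.beq_eq_decide_eq, String.ofList_inj, List.any_cons, List.any_nil, Bool.or_eq_true, decide_eq_true_eq, List.cons.injEq, List.take_succ_cons, List.take_zero]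
    by_cases hx2 : ('N' : Char) = c
    · subst hx2; simp_all [pvGroupOfStem, stemGroup_eq, prefixGroup_eq, pvMatchesSurgical, pvMatchesRespiratory, pvMatchesInfection, pvMatchesCardiovascular, pvMatchesNeurologic, PySem.Dict.contains_mk, PySem.Dict.get?_mk_cons, get?_mk_nil, PySem.Str.startswith_eq, strSlice_one, sw_one, sw_two, tlOf, ofList_eq_iff, eq_ofList_iff, tlI97, tlJ95, tlK91, tlM96, tlN99, tlR65, tlU07, tlR57, tlC70, tlC71, tlC72, tlD32, tlD33, tlD42, tlD43, tlS, tlT, tlV, tlW, tlX, tlY, tlJ, tlA, tlB, tlG, tlI, tlI6, beq_iff_eq, bne_eq, Bool.beq_eq_decide_eq, String.ofList_inj, List.any_cons, List.any_nil, Bool.or_eq_true, decide_eq_true_eq, List.cons.injEq, List.take_succ_cons, List.take_zero]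
    by_cases hx3 : ('R' : Char) = c
    · subst hx3; simp_all [pvGroupOfStem, stemGroup_eq, prefixGroup_eq, pvMatchesSurgical, pvMatchesRespiratory, pvMatchesInfection, pvMatchesCardiovascular, pvMatchesNeurologic, PySem.Dict.contains_mk, PySem.Dict.get?_mk_cons, get?_mk_nil, PySem.Str.startswith_eq, strSlice_one, sw_one, sw_two, tlOf, ofList_eq_iff, eq_ofList_iff, tlI97, tlJ95, tlK91, tlM96, tlN99, tlR65, tlU07, tlR57, tlC70, tlC71, tlC72, tlD32, tlD33, tlD42, tlD43, tlS, tlT, tlV, tlW, tlX, tlY, tlJ, tlA, tlB, tlG, tlI, tlI6, beq_iff_eq, bne_eq, Bool.beq_eq_decide_eq, String.ofList_inj, List.any_cons, List.any_nil, Bool.or_eq_true, decide_eq_true_eq, List.cons.injEq, List.take_succ_cons, List.take_zero]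
    by_cases hx4 : ('U' : Char) = c
    · subst hx4; simp_all [pvGroupOfStem, stemGroup_eq, prefixGroup_eq, pvMatchesSurgical, pvMatchesRespiratory, pvMatchesInfection, pvMatchesCardiovascular, pvMatchesNeurologic, PySem.Dict.contains_mk, PySem.Dict.get?_mk_cons, get?_mk_nil, PySem.Str.startswith_eq, strSlice_one, sw_one, sw_two, tlOf, ofList_eq_iff, eq_ofList_iff, tlI97, tlJ95, tlK91, tlM96, tlN99, tlR65, tlU07, tlR57, tlC70, tlC71, tlC72, tlD32, tlD33, tlD42, tlD43, tlS, tlT, tlV, tlW, tlX, tlY, tlJ, tlA, tlB, tlG, tlI, tlI6, beq_iff_eq, bne_eq, Bool.beq_eq_decide_eq, String.ofList_inj, List.any_cons, List.any_nil, Bool.or_eq_true, decide_eq_true_eq, List.cons.injEq, List.take_succ_cons, List.take_zero]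
    by_cases hx5 : ('C' : Char) = c
    · subst hx5; simp_all [pvGroupOfStem, stemGroup_eq, prefixGroup_eq, pvMatchesSurgical, pvMatchesRespiratory, pvMatchesInfection, pvMatchesCardiovascular, pvMatchesNeurologic, PySem.Dict.contains_mk, PySem.Dict.get?_mk_cons, get?_mk_nil, PySem.Str.startswith_eq, strSlice_one, sw_one, sw_two, tlOf, ofList_eq_iff, eq_ofList_iff, tlI97, tlJ95, tlK91, tlM96, tlN99, tlR65, tlU07, tlR57, tlC70, tlC71, tlC72, tlD32, tlD33, tlD42, tlD43, tlS, tlT, tlV, tlW, tlX, tlY, tlJ, tlA, tlB, tlG, tlI, tlI6, beq_iff_eq, bne_eq, Bool.beq_eq_decide_eq, String.ofList_inj, List.any_cons, List.any_nil, Bool.or_eq_true, decide_eq_true_eq, List.cons.injEq, List.take_succ_cons, List.take_zero]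
    by_cases hx6 : ('D' : Char) = c
    · subst hx6; simp_all [pvGroupOfStem, stemGroup_eq, prefixGroup_eq, pvMatchesSurgical, pvMatchesRespiratory, pvMatchesInfection, pvMatchesCardiovascular, pvMatchesNeurologic, PySem.Dict.contains_mk, PySem.Dict.get?_mk_cons, get?_mk_nil, PySem.Str.startswith_eq, strSlice_one, sw_one, sw_two, tlOf, ofList_eq_iff, eq_ofList_iff, tlI97, tlJ95, tlK91, tlM96, tlN99, tlR65, tlU07, tlR57, tlC70, tlC71, tlC72, tlD32, tlD33, tlD42, tlD43, tlS, tlT, tlV, tlW, tlX, tlY, tlJ, tlA, tlB, tlG, tlI, tlI6, beq_iff_eq, bne_eq, Bool.beq_eq_decide_eq, String.ofList_inj, List.any_cons, List.any_nil, Bool.or_eq_true, decide_eq_true_eq, List.cons.injEq, List.take_succ_cons, List.take_zero]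
    by_cases hc10 : ('I' : Char) = c
    · subst hc10
      cases r with
      | nil => decide
      | cons d r2 =>
        by_cases h6 : ('6' : Char) = d
        · subst h6; simp_all [pvGroupOfStem, stemGroup_eq, prefixGroup_eq, pvMatchesSurgical, pvMatchesRespiratory, pvMatchesInfection, pvMatchesCardiovascular, pvMatchesNeurologic, PySem.Dict.contains_mk, PySem.Dict.get?_mk_cons, get?_mk_nil, PySem.Str.startswith_eq, strSlice_one, sw_one, sw_two, tlOf, ofList_eq_iff, eq_ofList_iff, tlI97, tlJ95, tlK91, tlM96, tlN99, tlR65, tlU07, tlR57, tlC70, tlC71, tlC72, tlD32, tlD33, tlD42, tlD43, tlS, tlT, tlV, tlW, tlX, tlY, tlJ, tlA, tlB, tlG, tlI, tlI6, beq_iff_eq, bne_eq, Bool.beq_eq_decide_eq, String.ofList_inj, List.any_cons, List.any_nil, Bool.or_eq_true, decide_eq_true_eq, List.cons.injEq, List.take_succ_cons, List.take_zero]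
        · by_cases h9 : ('9' : Char) = d <;> by_cases h7 : (['7'] : List Char) = r2 <;> simp_all [pvGroupOfStem, stemGroup_eq, prefixGroup_eq, pvMatchesSurgical, pvMatchesRespiratory, pvMatchesInfection, pvMatchesCardiovascular, pvMatchesNeurologic, PySem.Dict.contains_mk, PySem.Dict.get?_mk_cons, get?_mk_nil, PySem.Str.startswith_eq, strSlice_one, sw_one, sw_two, tlOf, ofList_eq_iff, eq_ofList_iff, tlI97, tlJ95, tlK91, tlM96, tlN99, tlR65, tlU07, tlR57, tlC70, tlC71, tlC72, tlD32, tlD33, tlD42, tlD43, tlS, tlT, tlV, tlW, tlX, tlY, tlJ, tlA, tlB, tlG, tlI, tlI6, beq_iff_eq, bne_eq, Bool.beq_eq_decide_eq, String.ofList_inj, List.any_cons, List.any_nil, Bool.or_eq_true, decide_eq_true_eq, List.cons.injEq, List.take_succ_cons, List.take_zero]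
    simp_all [pvGroupOfStem, stemGroup_eq, prefixGroup_eq, pvMatchesSurgical, pvMatchesRespiratory, pvMatchesInfection, pvMatchesCardiovascular, pvMatchesNeurologic, PySem.Dict.contains_mk, PySem.Dict.get?_mk_cons, get?_mk_nil, PySem.Str.startswith_eq, strSlice_one, sw_one, sw_two, tlOf, ofList_eq_iff, eq_ofList_iff, tlI97, tlJ95, tlK91, tlM96, tlN99, tlR65, tlU07, tlR57, tlC70, tlC71, tlC72, tlD32, tlD33, tlD42, tlD43, tlS, tlT, tlV, tlW, tlX, tlY, tlJ, tlA, tlB, tlG, tlI, tlI6, beq_iff_eq, bne_eq, Bool.beq_eq_decide_eq, String.ofList_inj, List.any_cons, List.any_nil, Bool.or_eq_true, decide_eq_true_eq, List.cons.injEq, List.take_succ_cons, List.take_zero]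

-- membership in the hit set collected by B's fold is an any-scan
theorem pvMem_hit (xs : List String) (acc : PySem.Set Int) (g : Int) :
    (g ∈ xs.foldl
      (fun s stem => match pvGroupOfStem stem with
        | some g => PySem.Set.add s g
        | none => s) acc)
    ↔ g ∈ acc ∨ xs.any (fun stem => pvGroupOfStem stem == some g) := by
  induction xs generalizing acc with
  | nil => simp
  | cons x xs ih =>
    simp only [List.foldl_cons, List.any_cons, ih]
    cases h : pvGroupOfStem x with
    | none => simp [h]
    | some v =>
      simp [PySem.Set.mem_add, beq_iff_eq]
      constructor
      · rintro ((ha | rfl) | hx) <;> simp_all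
      · rintro (ha | (h1 | hx)) <;> simp_all

theorem pvContains_hit (xs : List String) (g : Int) :
    PySem.Set.contains
      (xs.foldl
        (fun s stem => match pvGroupOfStem stem with
          | some g => PySem.Set.add s g
          | none => s) PySem.Set.empty) g
    = xs.any (fun stem => pvGroupOfStem stem == some g) := by
  rw [Bool.eq_iff_iff, PySem.Set.contains_iff, pvMem_hit]
  simp [PySem.Set.empty]

-- ===== VERDICT (by name: the statement is the Claim_ definition above) =====
theorem match_candidate_disease_groups_spec : Claim_equal_match_candidate_disease_groups := by
  intro xs _
  show match_candidate_disease_groups xs = match_candidate_disease_groups_alt xs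
  have e0 : xs.any (fun s => pvGroupOfStem s == some 0) = xs.any pvMatchesSurgical :=
    PySem.List.any_congr_mem (fun s _ => (groupOf_matches s).1)
  have e1 : xs.any (fun s => pvGroupOfStem s == some 1) = xs.any pvMatchesRespiratory :=
    PySem.List.any_congr_mem (fun s _ => (groupOf_matches s).2.1)
  have e2 : xs.any (fun s => pvGroupOfStem s == some 2) = xs.any pvMatchesInfection :=
    PySem.List.any_congr_mem (fun s _ => (groupOf_matches s).2.2.1)
  have e3 : xs.any (fun s => pvGroupOfStem s == some 3) = xs.any pvMatchesCardiovascular :=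
    PySem.List.any_congr_mem (fun s _ => (groupOf_matches s).2.2.2.1)
  have e4 : xs.any (fun s => pvGroupOfStem s == some 4) = xs.any pvMatchesNeurologic :=
    PySem.List.any_congr_mem (fun s _ => (groupOf_matches s).2.2.2.2)
  simp only [match_candidate_disease_groups, match_candidate_disease_groups_alt, pvLabels,
    PySem.List.enumerate, List.filter_cons, List.filter_nil, pvContains_hit, ← e0, ← e1, ← e2, ← e3, ← e4]
  by_cases p0 : ∃ x ∈ xs, pvGroupOfStem x = some 0 <;>
  by_cases p1 : ∃ x ∈ xs, pvGroupOfStem x = some 1 <;>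
  by_cases p2 : ∃ x ∈ xs, pvGroupOfStem x = some 2 <;>
  by_cases p3 : ∃ x ∈ xs, pvGroupOfStem x = some 3 <;>
  by_cases p4 : ∃ x ∈ xs, pvGroupOfStem x = some 4 <;>
  simp [p0, p1, p2, p3, p4]
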